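-- pv_equiv track=rewrite | github.com/ibonafede/Github_Irene | rna-classifiers/rna-localization/preprocessing/rna_tokenizer.py | different_char
-- ===== SOURCE A (Python) =====
-- def different_char(sequence):
--     """ Split sequence by different characters
--     """
--     tokens = []
--     token_buffer = sequence[0]
--
--     for c in sequence[1:]:
--         if token_buffer[len(token_buffer)-1] != c:
--             tokens.append(token_buffer)
--             token_buffer = ""
--         token_buffer += c
--
--     return tokens
-- ===== SOURCE B (Python) =====
-- def different_char(sequence):
--     """Split sequence into runs of identical characters; the trailing run is dropped
--     (as in the original).  Builds whole runs with an inner scan, then slices off the last."""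
--     runs = []
--     rest = sequence
--     while rest:
--         head = rest[0]
--         j = 1
--         while j < len(rest) and rest[j] == head:
--             j += 1
--         runs.append(rest[:j])
--         rest = rest[j:]
--     return runs[:-1]
-- ===== Notes on version B (the rewrite author's own statement) =====
-- stated objective: alternative
-- what changed: B extracts whole runs with an outer loop plus inner same-char scan and slices off the last run, instead of A's single char-by-char fold that maintains a buffer and never emits the trailing one.
-- outside the precondition, e.g. on different_char(''): A raises IndexError, B returns []
import Mathlib
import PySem

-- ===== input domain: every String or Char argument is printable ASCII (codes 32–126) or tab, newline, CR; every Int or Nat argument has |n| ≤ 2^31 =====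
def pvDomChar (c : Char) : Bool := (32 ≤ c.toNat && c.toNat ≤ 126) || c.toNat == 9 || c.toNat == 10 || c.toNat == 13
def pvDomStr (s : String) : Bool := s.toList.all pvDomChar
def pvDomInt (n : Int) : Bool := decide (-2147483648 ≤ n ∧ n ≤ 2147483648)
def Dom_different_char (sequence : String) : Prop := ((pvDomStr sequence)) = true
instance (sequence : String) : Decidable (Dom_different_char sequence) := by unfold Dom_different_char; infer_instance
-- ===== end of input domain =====

-- B extracts whole runs (outer loop + inner same-char scan) and slices off the last,
-- instead of A's char-by-char buffer fold that never emits the trailing buffer.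

-- ===== PORT A =====
-- loop body of A: compare c with the last buffer char, flush buffer on change, extend it
def pvAStep (st : List (List Char) × List Char) (c : Char) : List (List Char) × List Char :=
  if PySem.List.pyGet? st.2 ((st.2.length : Int) - 1) ≠ some c then
    (st.1 ++ [st.2], ([] : List Char) ++ [c])
  else
    (st.1, st.2 ++ [c])

def different_char (sequence : String) : List String :=
  match sequence.toList with
  | [] => []          -- Python: sequence[0] raises IndexError here (excluded by Pre_)
  | c :: rest =>
      let r := rest.foldl pvAStep ([], [c])
      r.1.map String.mk

-- ===== PORT B =====
-- inner while: scan the characters equal to head (returns the scanned run tail and the rest)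
def pvTakeRun (c : Char) : List Char → List Char × List Char
  | [] => ([], [])
  | x :: xs =>
      if x == c then
        let (p, s) := pvTakeRun c xs
        (x :: p, s)
      else ([], x :: xs)

theorem pvTakeRun_snd_length_le (c : Char) (l : List Char) :
    (pvTakeRun c l).2.length ≤ l.length := by
  induction l with
  | nil => simp [pvTakeRun]
  | cons x xs ih =>
      by_cases h : x == c <;> simp [pvTakeRun, h] <;> omega

-- outer while: peel one whole run, recurse on the rest
def pvRuns : List Char → List (List Char)
  | [] => []
  | c :: rest =>
      (c :: (pvTakeRun c rest).1) :: pvRuns (pvTakeRun c rest).2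
  termination_by l => l.length
  decreasing_by
    have := pvTakeRun_snd_length_le c rest
    simp only [List.length_cons]; omega

def different_char_alt (sequence : String) : List String :=
  ((pvRuns sequence.toList).map String.mk).dropLast

-- ===== PRECONDITION & SPEC =====
-- Pre_ excludes only the empty string, on which A raises IndexError at sequence[0].
def Pre_different_char (sequence : String) : Prop := sequence ≠ ""
instance (sequence : String) : Decidable (Pre_different_char sequence) := by
  unfold Pre_different_char; infer_instance

def pvWitness_different_char : String := "AABCC"

def Spec_different_char (sequence : String) (out : List String) : Prop := out = different_char_alt sequence
instance (sequence : String) (out : List String) : Decidable (Spec_different_char sequence out) := by unfold Spec_different_char; infer_instance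

-- ===== CLAIM (what is proved, stated in full; the proofs are below) =====
def Claim_equal_different_char : Prop := ∀ (sequence : String), Dom_different_char sequence → Pre_different_char sequence → Spec_different_char sequence (different_char sequence)

-- ===== LEMMAS AND PROOFS =====

theorem pvGet_last (buf : List Char) (c : Char) (h : buf.getLast? = some c) :
    PySem.List.pyGet? buf ((buf.length : Int) - 1) = some c := by
  have hne : buf ≠ [] := by
    intro h0; rw [h0] at h; simp at h
  have hlen : 1 ≤ buf.length := List.length_pos_iff.mpr hne
  have : ((buf.length : Int) - 1) = ((buf.length - 1 : Nat) : Int) := by omega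
  rw [this, PySem.List.pyGet?_natCast]
  rw [← List.getLast?_eq_getElem?]
  exact h

theorem pvFold_eq (l : List Char) :
    ∀ (toks : List (List Char)) (buf : List Char) (c : Char),
      buf.getLast? = some c →
      l.foldl pvAStep (toks, buf) =
        (toks ++ (((buf ++ (pvTakeRun c l).1) :: pvRuns (pvTakeRun c l).2).dropLast),
         ((buf ++ (pvTakeRun c l).1) :: pvRuns (pvTakeRun c l).2).getLastD []) := by
  induction l with
  | nil =>
      intro toks buf c h
      simp [pvTakeRun, pvRuns]
  | cons x xs ih =>
      intro toks buf c h
      by_cases hx : x = c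
      · subst hx
        have hstep : pvAStep (toks, buf) x = (toks, buf ++ [x]) := by
          simp [pvAStep, pvGet_last buf x h]
        have hlast : (buf ++ [x]).getLast? = some x := by simp
        rw [List.foldl_cons, hstep, ih toks (buf ++ [x]) x hlast]
        simp [pvTakeRun, List.append_assoc]
      · have hstep : pvAStep (toks, buf) x = (toks ++ [buf], [x]) := by
          have hg : PySem.List.pyGet? buf ((buf.length : Int) - 1) = some c := pvGet_last buf c h
          simp only [pvAStep, hg]
          rw [if_pos (by simp; exact fun hcx => hx hcx.symm)]
          simp
        have hlast : ([x] : List Char).getLast? = some x := by simp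
        rw [List.foldl_cons, hstep, ih (toks ++ [buf]) [x] x hlast]
        have hrunsx : pvRuns (x :: xs) =
            (x :: (pvTakeRun x xs).1) :: pvRuns (pvTakeRun x xs).2 := by
          rw [pvRuns]
        have htk : pvTakeRun c (x :: xs) = ([], x :: xs) := by
          simp [pvTakeRun, hx]
        rw [htk]
        simp only [List.append_nil, hrunsx, Prod.mk.injEq, List.singleton_append]
        refine ⟨?_, ?_⟩
        · rw [List.dropLast_cons_of_ne_nil (List.cons_ne_nil _ _)]
          simp
        · simp [List.getLastD_cons]

theorem pvA_eq_runs (c : Char) (rest : List Char) :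
    (rest.foldl pvAStep ([], [c])).1 = (pvRuns (c :: rest)).dropLast := by
  rw [pvFold_eq rest [] [c] c (by simp)]
  rw [pvRuns]
  simp

-- ===== VERDICT (by name: the statement is the Claim_ definition above) =====
theorem different_char_spec : Claim_equal_different_char := by
  intro s _ hpre
  unfold Spec_different_char different_char different_char_alt
  have hne : s.toList ≠ [] := by
    intro h
    apply hpre
    have := congrArg String.ofList h
    simpa using this
  cases hl : s.toList with
  | nil => exact absurd hl hne
  | cons c rest =>
      simp only
      rw [pvA_eq_runs c rest, ← List.map_dropLast]
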